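-- pv_equiv track=rewrite | github.com/archarcade/experiments | framework/multi_run.py | abba
-- ===== SOURCE A (Python) =====
-- def abba(n_pairs: int) -> list[tuple[str, str]]:
--     """
--     ABBA ordering to balance order effects.
--     Pattern: AB, BA, AB, BA, ...
--     """
--     pairs: list[tuple[str, str]] = []
--     n = max(1, int(n_pairs))
--     for i in range(n):
--         if i % 2 == 0:
--             pairs.append(("baseline", "cedar"))
--         else:
--             pairs.append(("cedar", "baseline"))
--     return pairs
-- ===== SOURCE B (Python) =====
-- def abba(n_pairs: int) -> list[tuple[str, str]]:
--     """ABBA ordering: one period tiled and truncated, no per-element branch."""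
--     n = max(1, int(n_pairs))
--     cycle = [("baseline", "cedar"), ("cedar", "baseline")]
--     return (cycle * ((n + 1) // 2))[:n]
-- ===== Notes on version B (the rewrite author's own statement) =====
-- stated objective: idiomatic
-- what changed: Replaced the index loop with a per-element parity branch by building one ABBA period and tiling it ceil(n/2) times, then truncating to n.
import Mathlib
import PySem

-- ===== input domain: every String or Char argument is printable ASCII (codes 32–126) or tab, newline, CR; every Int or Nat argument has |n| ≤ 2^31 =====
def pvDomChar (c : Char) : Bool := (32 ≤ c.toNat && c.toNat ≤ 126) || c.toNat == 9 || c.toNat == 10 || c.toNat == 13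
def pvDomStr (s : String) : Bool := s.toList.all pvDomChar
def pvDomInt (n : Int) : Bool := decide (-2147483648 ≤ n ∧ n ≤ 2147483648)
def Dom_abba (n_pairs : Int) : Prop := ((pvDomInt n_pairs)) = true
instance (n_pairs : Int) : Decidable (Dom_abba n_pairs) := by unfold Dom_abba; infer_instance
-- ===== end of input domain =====

-- B builds one ABBA period and tiles/truncates it instead of A's index loop with a parity branch (idiomatic).

-- ===== PORT A =====
def abba (n_pairs : Int) : List (String × String) :=
  let n : Int := max 1 n_pairs
  (PySem.List.pyRange 0 n 1).foldl
    (fun pairs i =>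
      if PySem.Int.mod i 2 = 0 then pairs ++ [("baseline", "cedar")]
      else pairs ++ [("cedar", "baseline")]) []

-- ===== PORT B =====
def abba_alt (n_pairs : Int) : List (String × String) :=
  let n : Int := max 1 n_pairs
  let cycle : List (String × String) := [("baseline", "cedar"), ("cedar", "baseline")]
  -- 'cycle * k' is flatten (replicate k cycle) (empty for k ≤ 0, as in Python); '[:n]' is slice
  PySem.List.slice (List.flatten (List.replicate (PySem.Int.floordiv (n + 1) 2).toNat cycle)) none (some n)

-- ===== PRECONDITION & SPEC =====
def Spec_abba (n_pairs : Int) (out : List (String × String)) : Prop := out = abba_alt n_pairs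
instance (n_pairs : Int) (out : List (String × String)) : Decidable (Spec_abba n_pairs out) := by unfold Spec_abba; infer_instance

-- ===== CLAIM (what is proved, stated in full; the proofs are below) =====
def Claim_equal_abba : Prop := ∀ (n_pairs : Int), Dom_abba n_pairs → Spec_abba n_pairs (abba n_pairs)

-- ===== LEMMAS AND PROOFS =====

-- canonical element at position k
def abbaF (k : Nat) : String × String :=
  if k % 2 = 0 then ("baseline", "cedar") else ("cedar", "baseline")

lemma flatten_replicate_getElem? (K k : Nat) (hk : k < 2 * K) :
    (List.flatten (List.replicate K [("baseline", "cedar"), ("cedar", "baseline")]))[k]? =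
      some (abbaF k) := by
  induction K generalizing k with
  | zero => omega
  | succ K ih =>
    rw [List.replicate_succ, List.flatten_cons]
    rcases Nat.lt_or_ge k 2 with h | h
    · interval_cases k <;> simp [abbaF]
    · rw [List.getElem?_append_right (by simp; omega)]
      simp only [List.length_cons, List.length_nil]
      rw [ih (k - 2) (by omega)]
      congr 1
      unfold abbaF
      have : (k - 2) % 2 = k % 2 := by omega
      rw [this]

lemma a_side (m : Nat) :
    (PySem.List.pyRange 0 (m : Int) 1).foldl
      (fun pairs i =>
        if PySem.Int.mod i 2 = 0 then pairs ++ [("baseline", "cedar")]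
        else pairs ++ [("cedar", "baseline")]) [] =
      (List.range m).map abbaF := by
  induction m with
  | zero => simp
  | succ m ih =>
    have h : (0 : Int) ≤ (m : Int) := by positivity
    rw [show ((m + 1 : Nat) : Int) = (m : Int) + 1 by push_cast; ring,
        PySem.List.pyRange_one_succ_right h, List.foldl_append, ih, List.range_succ, List.map_append]
    simp only [List.foldl_cons, List.foldl_nil]
    have hm : PySem.Int.mod (m : Int) 2 = ((m % 2 : Nat) : Int) := PySem.Int.mod_natCast m 2
    by_cases he : m % 2 = 0 <;> simp [he, abbaF] <;> omega

theorem abba_spec : Claim_equal_abba := by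
  intro n_pairs _
  simp only [Spec_abba, abba, abba_alt]
  set n : Int := max 1 n_pairs with hn
  have hn1 : 1 ≤ n := le_max_left _ _
  obtain ⟨m, hm⟩ : ∃ m : Nat, n = (m : Int) := ⟨n.toNat, (Int.toNat_of_nonneg (by omega)).symm⟩
  have hm1 : 1 ≤ m := by omega
  rw [hm, a_side]
  -- B side: floordiv ((m+1)) 2 = (m+1)/2 as Nat
  have hfd : PySem.Int.floordiv ((m : Int) + 1) 2 = (((m + 1) / 2 : Nat) : Int) := by
    rw [show ((m : Int) + 1) = ((m + 1 : Nat) : Int) by push_cast; ring]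
    exact_mod_cast PySem.Int.floordiv_natCast (m + 1) 2
  rw [hfd, PySem.List.slice_to_natCast]
  simp only [Int.toNat_natCast]
  set K : Nat := (m + 1) / 2 with hK
  apply List.ext_getElem?
  intro k
  rcases Nat.lt_or_ge k m with hk | hk
  · rw [List.getElem?_take_of_lt hk, List.getElem?_map,
        flatten_replicate_getElem? K k (by omega), List.getElem?_range hk]
    rfl
  · rw [List.getElem?_eq_none (by simp; omega),
        List.getElem?_eq_none (by simp; omega)]
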